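-- pv_equiv track=rewrite | github.com/Alujack/ai-anti-spam-shield-service-model | app/model/feature_extractors.py | _max_consecutive_digits
-- ===== SOURCE A (Python) =====
-- def _max_consecutive_digits(text: str) -> int:
--     """Find maximum consecutive digits in text"""
--     max_count = 0
--     current_count = 0
--
--     for char in text:
--         if char.isdigit():
--             current_count += 1
--             max_count = max(max_count, current_count)
--         else:
--             current_count = 0
--
--     return max_count
-- ===== SOURCE B (Python) =====
-- def _max_consecutive_digits(text: str) -> int:
--     """Find maximum consecutive digits in text (run-scanner: jump over whole digit runs)."""
--     best = 0
--     i = 0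
--     n = len(text)
--     while i < n:
--         if text[i].isdigit():
--             j = i
--             while j < n and text[j].isdigit():
--                 j += 1
--             best = max(best, j - i)
--             i = j
--         else:
--             i += 1
--     return best
-- ===== Notes on version B (the rewrite author's own statement) =====
-- stated objective: alternative
-- what changed: B scans the string as digit runs with a two-pointer jump (measure each maximal digit run at once and skip it), instead of A's per-character running counter updated with max at every digit.
import Mathlib
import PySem

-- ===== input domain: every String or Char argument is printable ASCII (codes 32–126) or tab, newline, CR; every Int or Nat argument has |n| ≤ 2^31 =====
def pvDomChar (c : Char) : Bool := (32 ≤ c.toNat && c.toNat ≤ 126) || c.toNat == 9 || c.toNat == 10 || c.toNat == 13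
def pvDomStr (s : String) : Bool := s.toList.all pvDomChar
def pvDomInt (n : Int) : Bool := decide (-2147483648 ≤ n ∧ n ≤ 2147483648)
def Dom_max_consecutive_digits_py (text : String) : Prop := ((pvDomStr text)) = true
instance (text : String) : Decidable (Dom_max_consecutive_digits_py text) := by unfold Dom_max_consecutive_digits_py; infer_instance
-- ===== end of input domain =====

-- B scans the string as maximal digit runs (two-pointer jump) instead of A's per-character counter; alternative decomposition, same cost.

-- ===== PORT A =====
-- per-character loop with state (max_count, current_count), exactly as in A
def max_consecutive_digits_py (text : String) : Int :=
  (text.toList.foldl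
    (fun (st : Int × Int) c =>
      if PySem.Chars.isdigit c then (max st.1 (st.2 + 1), st.2 + 1)
      else (st.1, 0))
    (0, 0)).1

-- ===== PORT B =====
-- run scanner: at a digit, measure the whole maximal digit run (takeWhile) and skip it (dropWhile)
def pvBloop : List Char → Int → Int
  | [], best => best
  | c :: t, best =>
    if PySem.Chars.isdigit c then
      pvBloop (t.dropWhile PySem.Chars.isdigit)
        (max best (((t.takeWhile PySem.Chars.isdigit).length : Int) + 1))
    else pvBloop t best
termination_by l _ => l.length
decreasing_by
  · exact Nat.lt_succ_of_le (List.length_dropWhile_le _ _)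
  · exact Nat.lt_succ_self _

def max_consecutive_digits_py_alt (text : String) : Int :=
  pvBloop text.toList 0

-- ===== PRECONDITION & SPEC =====
def Spec_max_consecutive_digits_py (text : String) (out : Int) : Prop := out = max_consecutive_digits_py_alt text
instance (text : String) (out : Int) : Decidable (Spec_max_consecutive_digits_py text out) := by unfold Spec_max_consecutive_digits_py; infer_instance

-- ===== CLAIM (what is proved, stated in full; the proofs are below) =====
def Claim_equal_max_consecutive_digits_py : Prop := ∀ (text : String), Dom_max_consecutive_digits_py text → Spec_max_consecutive_digits_py text (max_consecutive_digits_py text)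

-- ===== LEMMAS AND PROOFS =====

theorem pvBloop_cons_digit (c : Char) (t : List Char) (b : Int)
    (h : PySem.Chars.isdigit c = true) :
    pvBloop (c :: t) b
      = pvBloop (t.dropWhile PySem.Chars.isdigit)
          (max b (((t.takeWhile PySem.Chars.isdigit).length : Int) + 1)) := by
  rw [pvBloop]; simp [h]

theorem pvBloop_cons_nondigit (c : Char) (t : List Char) (b : Int)
    (h : PySem.Chars.isdigit c = false) :
    pvBloop (c :: t) b = pvBloop t b := by
  rw [pvBloop]; simp [h]

theorem pvBloop_ge (l : List Char) (b : Int) : b ≤ pvBloop l b := by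
  induction l, b using pvBloop.induct with
  | case1 b => simp [pvBloop]
  | case2 c t b h ih =>
    rw [pvBloop_cons_digit c t b h]
    exact le_trans (le_max_left _ _) ih
  | case3 c t b h ih =>
    rw [pvBloop_cons_nondigit c t b (by simpa using h)]
    exact ih

theorem pvBloop_zero_nonneg (l : List Char) : 0 ≤ pvBloop l 0 := pvBloop_ge l 0

theorem pvBloop_max_aux : ∀ (n : Nat) (l : List Char), l.length ≤ n →
    ∀ b : Int, 0 ≤ b → pvBloop l b = max b (pvBloop l 0) := by
  intro n
  induction n with
  | zero =>
    intro l hl b hb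
    have : l = [] := List.length_eq_zero_iff.mp (Nat.le_zero.mp hl)
    subst this
    simp [pvBloop]; omega
  | succ n ih =>
    intro l hl b hb
    match l with
    | [] => simp [pvBloop]; omega
    | c :: t =>
      by_cases h : PySem.Chars.isdigit c = true
      · rw [pvBloop_cons_digit c t b h, pvBloop_cons_digit c t 0 h]
        have hlen : (t.dropWhile PySem.Chars.isdigit).length ≤ n :=
          le_trans (List.length_dropWhile_le _ _) (Nat.succ_le_succ_iff.mp hl)
        have e1 := ih (t.dropWhile PySem.Chars.isdigit) hlen
          (max b (((t.takeWhile PySem.Chars.isdigit).length : Int) + 1)) (by positivity)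
        have e2 := ih (t.dropWhile PySem.Chars.isdigit) hlen
          (max 0 (((t.takeWhile PySem.Chars.isdigit).length : Int) + 1)) (by positivity)
        rw [e1, e2]
        omega
      · rw [pvBloop_cons_nondigit c t b (by simpa using h),
            pvBloop_cons_nondigit c t 0 (by simpa using h)]
        exact ih t (Nat.succ_le_succ_iff.mp hl) b hb

theorem pvBloop_max (l : List Char) (b : Int) (hb : 0 ≤ b) :
    pvBloop l b = max b (pvBloop l 0) :=
  pvBloop_max_aux l.length l le_rfl b hb

-- decomposition: the result is the max of the leading digit-run length and the result on the rest
theorem pvBloop_decomp (l : List Char) :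
    pvBloop l 0 = max ((l.takeWhile PySem.Chars.isdigit).length : Int)
      (pvBloop (l.dropWhile PySem.Chars.isdigit) 0) := by
  match l with
  | [] => simp [pvBloop]
  | c :: t =>
    by_cases h : PySem.Chars.isdigit c = true
    · rw [pvBloop_cons_digit c t 0 h,
          pvBloop_max (t.dropWhile PySem.Chars.isdigit)
            (max 0 (((t.takeWhile PySem.Chars.isdigit).length : Int) + 1)) (by positivity)]
      simp only [List.takeWhile_cons_of_pos h, List.dropWhile_cons_of_pos h, List.length_cons]
      push_cast
      omega
    · have h' : PySem.Chars.isdigit c = false := by simpa using h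
      have h0 := pvBloop_zero_nonneg t
      simp only [List.takeWhile_cons_of_neg (p := PySem.Chars.isdigit) (l := t) (a := c) (by simp [h']),
        List.dropWhile_cons_of_neg (p := PySem.Chars.isdigit) (l := t) (a := c) (by simp [h'])]
      rw [pvBloop_cons_nondigit c t 0 h']
      simp only [List.length_nil]
      omega

theorem pvLead_le (l : List Char) :
    ((l.takeWhile PySem.Chars.isdigit).length : Int) ≤ pvBloop l 0 := by
  rw [pvBloop_decomp l]; exact le_max_left _ _

theorem pvMain (l : List Char) (m cur : Int) (hc : 0 ≤ cur) (hm : cur ≤ m) :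
    (l.foldl
      (fun (st : Int × Int) c =>
        if PySem.Chars.isdigit c then (max st.1 (st.2 + 1), st.2 + 1)
        else (st.1, 0))
      (m, cur)).1
    = max m (max (cur + ((l.takeWhile PySem.Chars.isdigit).length : Int)) (pvBloop l 0)) := by
  induction l generalizing m cur with
  | nil => simp [pvBloop]; omega
  | cons c t ih =>
    by_cases h : PySem.Chars.isdigit c = true
    · simp only [List.foldl_cons, List.takeWhile_cons, h, if_true]
      rw [ih (max m (cur + 1)) (cur + 1) (by omega) (by omega)]
      rw [pvBloop_cons_digit c t 0 h,
          pvBloop_max (t.dropWhile PySem.Chars.isdigit)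
            (max 0 (((t.takeWhile PySem.Chars.isdigit).length : Int) + 1)) (by positivity),
          pvBloop_decomp t]
      have h2 := pvBloop_zero_nonneg (t.dropWhile PySem.Chars.isdigit)
      simp only [List.length_cons]
      push_cast
      omega
    · have h' : PySem.Chars.isdigit c = false := by simpa using h
      simp only [List.foldl_cons, List.takeWhile_cons, h', if_false, Bool.false_eq_true]
      rw [ih m 0 le_rfl (by omega)]
      rw [pvBloop_cons_nondigit c t 0 h']
      have h1 := pvLead_le t
      have h2 := pvBloop_zero_nonneg t
      simp only [List.length_nil]
      push_cast
      omega

-- ===== VERDICT (by name: the statement is the Claim_ definition above) =====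
theorem max_consecutive_digits_py_spec : Claim_equal_max_consecutive_digits_py := by
  intro text _
  unfold Spec_max_consecutive_digits_py max_consecutive_digits_py max_consecutive_digits_py_alt
  rw [pvMain text.toList 0 0 le_rfl le_rfl]
  have h1 := pvLead_le text.toList
  have h2 := pvBloop_zero_nonneg text.toList
  omega
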